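-- pv_equiv track=rewrite | github.com/jmavila2/SplitPay | SplitPayments_mobile.py | split_amount_cents_fair
-- ===== SOURCE A (Python) =====
-- from typing import List, Dict, Tuple
--
-- def split_amount_cents_fair(amount_cents: int, participants: List[str]) -> Dict[str, int]:
--     n = len(participants)
--     base = amount_cents // n
--     rem = amount_cents % n
--     sorted_participants = sorted(participants, key=lambda x: x.lower())
--     shares = {p: base for p in participants}
--     for i in range(rem):
--         shares[sorted_participants[i]] += 1
--     return shares
-- ===== SOURCE B (Python) =====
-- def split_amount_cents_fair(amount_cents, participants):
--     n = len(participants)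
--     base = amount_cents // n
--     rem = amount_cents % n
--     keys = [p.lower() for p in participants]
--     shares = {}
--     for i, p in enumerate(participants):
--         if p not in shares:
--             shares[p] = base
--         rank = sum(1 for j in range(n)
--                    if keys[j] < keys[i] or (keys[j] == keys[i] and j < i))
--         if rank < rem:
--             shares[p] += 1
--     return shares
-- ===== Notes on version B (the rewrite author's own statement) =====
-- stated objective: alternative
-- what changed: B never sorts: for each occurrence it computes the stable case-insensitive rank directly by counting comparisons (strictly smaller key, or equal key and earlier position) and awards the extra cent iff that rank is below the remainder; it trades the sort for quadratic comparison counting.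
import Mathlib
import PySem

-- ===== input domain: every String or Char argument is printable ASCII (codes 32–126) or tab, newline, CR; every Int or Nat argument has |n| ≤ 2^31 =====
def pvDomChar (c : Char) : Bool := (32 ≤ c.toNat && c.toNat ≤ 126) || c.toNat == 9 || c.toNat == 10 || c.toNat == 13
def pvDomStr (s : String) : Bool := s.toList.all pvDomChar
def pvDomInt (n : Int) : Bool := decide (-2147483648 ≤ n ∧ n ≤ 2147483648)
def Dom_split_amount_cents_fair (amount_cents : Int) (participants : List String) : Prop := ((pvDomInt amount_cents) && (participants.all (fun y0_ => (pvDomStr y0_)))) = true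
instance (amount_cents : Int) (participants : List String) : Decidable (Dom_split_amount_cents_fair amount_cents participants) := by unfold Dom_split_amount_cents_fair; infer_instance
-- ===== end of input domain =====

-- B replaces A's sort-then-increment algorithm by a sortless one: each occurrence's stable
-- case-insensitive rank is computed by counting comparisons, and it earns the extra cent
-- iff that rank is below the remainder (alternative algorithm; O(n^2) instead of a sort).

-- ===== PORT A =====
def split_amount_cents_fair (amount_cents : Int) (participants : List String) : List (String × Int) :=
  let n : Int := participants.length
  let base := PySem.Int.floordiv amount_cents n
  let rem := PySem.Int.mod amount_cents n
  let sorted_participants := PySem.List.sorted participants (fun x => PySem.Str.lower x) false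
  let shares : PySem.Dict String Int :=
    participants.foldl (fun d p => d.insert p base) PySem.Dict.empty
  let shares :=
    (PySem.List.pyRange 0 rem 1).foldl
      (fun d i => d.modify (PySem.List.pyGetD sorted_participants i "") 0 (· + 1)) shares
  shares.items

-- ===== PORT B =====
-- B-side helper: the body of B's loop over enumerate(participants)
def bstep (base rem n : Int) (keys : List String) (d : PySem.Dict String Int) (e : Int × String) :
    PySem.Dict String Int :=
  let d1 := if d.contains e.2 then d else d.insert e.2 base
  let rank : Int :=
    ((PySem.List.pyRange 0 n 1).map (fun j =>
      if PySem.List.pyGetD keys j "" < PySem.List.pyGetD keys e.1 ""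
         ∨ (PySem.List.pyGetD keys j "" = PySem.List.pyGetD keys e.1 "" ∧ j < e.1)
      then (1 : Int) else 0)).sum
  if rank < rem then d1.modify e.2 0 (· + 1) else d1

def split_amount_cents_fair_alt (amount_cents : Int) (participants : List String) : List (String × Int) :=
  let n : Int := participants.length
  let base := PySem.Int.floordiv amount_cents n
  let rem := PySem.Int.mod amount_cents n
  let keys := participants.map (fun p => PySem.Str.lower p)
  let shares : PySem.Dict String Int :=
    (PySem.List.enumerate participants).foldl (bstep base rem n keys) PySem.Dict.empty
  shares.items

-- ===== PRECONDITION & SPEC =====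
-- Pre_ excludes only the empty participant list, on which Python A raises ZeroDivisionError.
def Pre_split_amount_cents_fair (amount_cents : Int) (participants : List String) : Prop :=
  participants ≠ []
instance (amount_cents : Int) (participants : List String) : Decidable (Pre_split_amount_cents_fair amount_cents participants) := by unfold Pre_split_amount_cents_fair; infer_instance

def pvWitness_split_amount_cents_fair : Int × List String := (7, ["bob", "Al", "al"])

def Spec_split_amount_cents_fair (amount_cents : Int) (participants : List String) (out : List (String × Int)) : Prop := out = split_amount_cents_fair_alt amount_cents participants
instance (amount_cents : Int) (participants : List String) (out : List (String × Int)) : Decidable (Spec_split_amount_cents_fair amount_cents participants out) := by unfold Spec_split_amount_cents_fair; infer_instance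

-- ===== CLAIM (what is proved, stated in full; the proofs are below) =====
def Claim_equal_split_amount_cents_fair : Prop := ∀ (amount_cents : Int) (participants : List String), Dom_split_amount_cents_fair amount_cents participants → Pre_split_amount_cents_fair amount_cents participants → Spec_split_amount_cents_fair amount_cents participants (split_amount_cents_fair amount_cents participants)

-- ===== LEMMAS AND PROOFS =====

-- the stable order: strictly smaller key, or equal key and earlier original index
def pvLex (e f : Int × String) : Bool :=
  decide (PySem.Str.lower e.2 < PySem.Str.lower f.2) ||
  (decide (PySem.Str.lower e.2 = PySem.Str.lower f.2) && decide (e.1 < f.1))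

-- insertion (by key only, as A's sort does) of an (index, name) pair
def pvInsP (x : Int × String) (ys : List (Int × String)) : List (Int × String) :=
  PySem.List.insertBy (fun a b => decide (PySem.Str.lower a.2 < PySem.Str.lower b.2)) x ys

-- A's insertion sort, run on (index, name) pairs
def pvSP (xs : List String) : List (Int × String) :=
  (PySem.List.enumerate xs).foldl (fun acc e => pvInsP e acc) []

-- B's comparison-counting rank expression
def pvRank (n : Int) (keys : List String) (e : Int × String) : Int :=
  ((PySem.List.pyRange 0 n 1).map (fun j =>
    if PySem.List.pyGetD keys j "" < PySem.List.pyGetD keys e.1 ""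
       ∨ (PySem.List.pyGetD keys j "" = PySem.List.pyGetD keys e.1 "" ∧ j < e.1)
    then (1 : Int) else 0)).sum

theorem pvLex_trans {a b c : Int × String} (h1 : pvLex a b = true) (h2 : pvLex b c = true) :
    pvLex a c = true := by
  simp only [pvLex, Bool.or_eq_true, Bool.and_eq_true, decide_eq_true_eq] at *
  rcases h1 with h1 | ⟨h1e, h1i⟩ <;> rcases h2 with h2 | ⟨h2e, h2i⟩
  · exact Or.inl (lt_trans h1 h2)
  · exact Or.inl (h2e ▸ h1)
  · exact Or.inl (h1e ▸ h2)
  · exact Or.inr ⟨h1e.trans h2e, lt_trans h1i h2i⟩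

theorem pvLex_irrefl (a : Int × String) : pvLex a a = false := by
  simp [pvLex]

theorem pvLex_asymm {a b : Int × String} (h1 : pvLex a b = true) (h2 : pvLex b a = true) : False := by
  have := pvLex_trans h1 h2
  rw [pvLex_irrefl] at this
  exact Bool.false_ne_true this

theorem pvLex_key_le {a b : Int × String} (h : pvLex a b = true) :
    PySem.Str.lower a.2 ≤ PySem.Str.lower b.2 := by
  simp only [pvLex, Bool.or_eq_true, Bool.and_eq_true, decide_eq_true_eq] at h
  rcases h with h | ⟨h, _⟩
  · exact le_of_lt h
  · exact le_of_eq h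

theorem map_snd_pvInsP (x : Int × String) (ys : List (Int × String)) :
    (pvInsP x ys).map (·.2)
      = PySem.List.insertBy (fun a b => decide (PySem.Str.lower a < PySem.Str.lower b)) x.2
          (ys.map (·.2)) := by
  induction ys with
  | nil => rfl
  | cons y ys ih =>
    simp only [pvInsP, PySem.List.insertBy, List.map_cons] at *
    split_ifs with h
    · rfl
    · simp only [List.map_cons, ih]

theorem map_snd_foldl_pvInsP (es : List (Int × String)) (acc : List (Int × String)) :
    (es.foldl (fun a e => pvInsP e a) acc).map (·.2)
      = (es.map (·.2)).foldl
          (fun a y => PySem.List.insertBy (fun p q => decide (PySem.Str.lower p < PySem.Str.lower q)) y a)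
          (acc.map (·.2)) := by
  induction es generalizing acc with
  | nil => rfl
  | cons e es ih => simp only [List.foldl_cons, List.map_cons, ih, map_snd_pvInsP]

theorem sorted_eq_map_snd_pvSP (xs : List String) :
    PySem.List.sorted xs (fun p => PySem.Str.lower p) false = (pvSP xs).map (·.2) := by
  rw [PySem.List.sorted_eq_foldl_insertBy, pvSP, map_snd_foldl_pvInsP]
  simp [PySem.List.map_snd_enumerate]

theorem pvInsP_perm (x : Int × String) (ys : List (Int × String)) :
    (pvInsP x ys).Perm (x :: ys) := by
  induction ys with
  | nil => exact List.Perm.refl _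
  | cons y ys ih =>
    simp only [pvInsP, PySem.List.insertBy] at *
    split_ifs with h
    · exact List.Perm.refl _
    · exact (ih.cons y).trans (List.Perm.swap x y ys)

theorem pvSP_perm (xs : List String) : (pvSP xs).Perm (PySem.List.enumerate xs) := by
  have gen : ∀ (es acc : List (Int × String)),
      (es.foldl (fun a e => pvInsP e a) acc).Perm (acc ++ es) := by
    intro es
    induction es with
    | nil => simp
    | cons e es ih =>
      intro acc
      simp only [List.foldl_cons]
      refine (ih (pvInsP e acc)).trans ?_
      refine (List.Perm.append_right es (pvInsP_perm e acc)).trans ?_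
      exact List.perm_middle.symm
  simpa using gen (PySem.List.enumerate xs) []

theorem pvInsP_pairwise (e : Int × String) (acc : List (Int × String))
    (hp : acc.Pairwise (fun a b => pvLex a b = true))
    (hidx : ∀ a ∈ acc, a.1 < e.1) :
    (pvInsP e acc).Pairwise (fun a b => pvLex a b = true) := by
  induction acc with
  | nil => simp [pvInsP, PySem.List.insertBy]
  | cons y ys ih =>
    simp only [pvInsP, PySem.List.insertBy] at ih ⊢
    split_ifs with hd
    · rw [decide_eq_true_eq] at hd
      refine List.Pairwise.cons ?_ hp
      intro z hz
      rcases List.mem_cons.mp hz with hz | hz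
      · subst hz; simp [pvLex, hd]
      · have hyz : pvLex y z = true := (List.pairwise_cons.mp hp).1 z hz
        have : PySem.Str.lower e.2 < PySem.Str.lower z.2 :=
          lt_of_lt_of_le hd (pvLex_key_le hyz)
        simp [pvLex, this]
    · simp only [decide_eq_true_eq] at hd
      have hy : pvLex y e = true := by
        have hyle : PySem.Str.lower y.2 ≤ PySem.Str.lower e.2 := le_of_not_gt hd
        rcases lt_or_eq_of_le hyle with hlt | heq
        · simp [pvLex, hlt]
        · have hyi : y.1 < e.1 := hidx y List.mem_cons_self
          simp [pvLex, heq, hyi]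
      refine List.Pairwise.cons ?_ (ih (List.pairwise_cons.mp hp).2
        (fun a ha => hidx a (List.mem_cons_of_mem y ha)))
      intro z hz
      rcases (PySem.List.mem_insertBy _ _ _ _).mp hz with hz' | hz'
      · subst hz'; exact hy
      · exact (List.pairwise_cons.mp hp).1 z hz' 

theorem pvSP_pairwise (xs : List String) :
    (pvSP xs).Pairwise (fun a b => pvLex a b = true) := by
  have gen : ∀ (es acc : List (Int × String)),
      es.Pairwise (fun p q => p.1 < q.1) →
      acc.Pairwise (fun a b => pvLex a b = true) →
      (∀ a ∈ acc, ∀ f ∈ es, a.1 < f.1) →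
      (es.foldl (fun a e => pvInsP e a) acc).Pairwise (fun a b => pvLex a b = true) := by
    intro es
    induction es with
    | nil => intro acc _ h2 _; simpa using h2
    | cons e es ih =>
      intro acc h1 h2 h3
      simp only [List.foldl_cons]
      refine ih (pvInsP e acc) (List.pairwise_cons.mp h1).2 ?_ ?_
      · exact pvInsP_pairwise e acc h2 (fun a ha => h3 a ha e List.mem_cons_self)
      · intro a ha f hf
        rcases (PySem.List.mem_insertBy _ _ _ _).mp ha with ha' | ha'
        · subst ha'
          exact (List.pairwise_cons.mp h1).1 f hf
        · exact h3 a ha' f (List.mem_cons_of_mem e hf)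
  exact gen (PySem.List.enumerate xs) [] (PySem.List.pairwise_lt_enumerate _ _)
    List.Pairwise.nil (by simp)

-- position of an element of a strictly pvLex-sorted list = number of pvLex-predecessors
theorem countP_lex_getElem (zs : List (Int × String))
    (hp : zs.Pairwise (fun a b => pvLex a b = true))
    (m : Nat) (hm : m < zs.length) :
    zs.countP (fun f => pvLex f zs[m]) = m := by
  have hpg := List.pairwise_iff_getElem.mp hp
  have hsplit : zs.countP (fun f => pvLex f zs[m])
      = (zs.take m).countP (fun f => pvLex f zs[m]) + (zs.drop m).countP (fun f => pvLex f zs[m]) := by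
    rw [← List.countP_append, List.take_append_drop]
  rw [hsplit]
  have h1 : (zs.take m).countP (fun f => pvLex f zs[m]) = m := by
    have hlen : (zs.take m).length = m := by
      rw [List.length_take]; omega
    have : ∀ a ∈ zs.take m, pvLex a zs[m] = true := by
      intro a ha
      obtain ⟨i, hi, hai⟩ := List.mem_iff_getElem.mp ha
      have hi' : i < m := by omega
      have : (zs.take m)[i] = zs[i] := List.getElem_take
      subst hai
      rw [this]
      exact hpg i m (by omega) hm hi'
    calc (zs.take m).countP (fun f => pvLex f zs[m]) = (zs.take m).length :=
          List.countP_eq_length.mpr this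
      _ = m := hlen
  have h2 : (zs.drop m).countP (fun f => pvLex f zs[m]) = 0 := by
    apply List.countP_eq_zero.mpr
    intro a ha
    obtain ⟨i, hi, hai⟩ := List.mem_iff_getElem.mp ha
    have hgd : (zs.drop m)[i] = zs[m + i]'(by simp at hi; omega) := by
      rw [List.getElem_drop]
    subst hai
    rw [hgd]
    rcases Nat.eq_zero_or_pos i with h0 | h0
    · subst h0
      simp [pvLex_irrefl]
    · have hlex : pvLex zs[m] (zs[m + i]'(by simp at hi; omega)) = true :=
        hpg m (m + i) hm (by simp at hi; omega) (by omega)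
      simp only [Bool.not_eq_true] at *
      by_contra hc
      simp only [Bool.not_eq_false] at hc
      exact pvLex_asymm hc hlex
  omega

theorem countP_take_of_pairwise (zs : List (Int × String))
    (hp : zs.Pairwise (fun a b => pvLex a b = true))
    (r : Nat) (p : Int × String → Bool) :
    (zs.take r).countP p
      = zs.countP (fun f => p f && decide (zs.countP (fun g => pvLex g f) < r)) := by
  have hsplit : zs.countP (fun f => p f && decide (zs.countP (fun g => pvLex g f) < r))
      = (zs.take r).countP (fun f => p f && decide (zs.countP (fun g => pvLex g f) < r))
        + (zs.drop r).countP (fun f => p f && decide (zs.countP (fun g => pvLex g f) < r)) := by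
    rw [← List.countP_append, List.take_append_drop]
  rw [hsplit]
  have h1 : (zs.take r).countP (fun f => p f && decide (zs.countP (fun g => pvLex g f) < r))
      = (zs.take r).countP p := by
    apply List.countP_congr
    intro a ha
    obtain ⟨i, hi, hai⟩ := List.mem_iff_getElem.mp ha
    have hir : i < r := by simp at hi; omega
    have hiz : i < zs.length := by simp at hi; omega
    have hat : (zs.take r)[i] = zs[i] := List.getElem_take
    subst hai
    rw [hat]
    rw [countP_lex_getElem zs hp i hiz]
    simp [hir]
  have h2 : (zs.drop r).countP (fun f => p f && decide (zs.countP (fun g => pvLex g f) < r)) = 0 := by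
    apply List.countP_eq_zero.mpr
    intro a ha
    obtain ⟨i, hi, hai⟩ := List.mem_iff_getElem.mp ha
    have hiz : r + i < zs.length := by simp at hi; omega
    have hgd : (zs.drop r)[i] = zs[r + i]'hiz := by rw [List.getElem_drop]
    subst hai
    rw [hgd, countP_lex_getElem zs hp (r + i) hiz]
    simp
  omega

-- count of name k in the first r sorted slots, expressed by stable ranks over the original list
theorem take_sorted_count (xs : List String) (r : Nat) (k : String) :
    ((PySem.List.sorted xs (fun p => PySem.Str.lower p) false).take r).count k
      = (PySem.List.enumerate xs).countP
          (fun e => e.2 == k && decide ((PySem.List.enumerate xs).countP (fun f => pvLex f e) < r)) := by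
  have hperm := pvSP_perm xs
  have hcp : ∀ f : Int × String,
      (PySem.List.enumerate xs).countP (fun g => pvLex g f) = (pvSP xs).countP (fun g => pvLex g f) :=
    fun f => (hperm.countP_eq _).symm
  have h0 : ∀ (l : List (Int × String)), (l.map (·.2)).count k = l.countP (fun e => e.2 == k) := by
    intro l
    rw [List.count_eq_countP, List.countP_map]
    rfl
  rw [sorted_eq_map_snd_pvSP, ← List.map_take, h0]
  have hmid : ((pvSP xs).take r).countP (fun e => e.2 == k) =
      (pvSP xs).countP (fun f => (f.2 == k) && decide ((pvSP xs).countP (fun g => pvLex g f) < r)) :=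
    countP_take_of_pairwise (pvSP xs) (pvSP_pairwise xs) r _
  rw [hmid, hperm.countP_eq]
  simp only [hcp]

-- B's comparison-counting sum IS the stable rank (a pvLex-predecessor count)
theorem rank_sum_eq (xs : List String) (e : Int × String) (he : e ∈ PySem.List.enumerate xs) :
    pvRank (xs.length : Int) (xs.map (fun p => PySem.Str.lower p)) e
      = ((PySem.List.enumerate xs).countP (fun f => pvLex f e) : Int) := by
  unfold pvRank
  obtain ⟨m, hm, hem⟩ := (PySem.List.mem_enumerate_iff xs 0 e).mp he
  have hkey : PySem.List.pyGetD (xs.map (fun p => PySem.Str.lower p)) e.1 "" = PySem.Str.lower e.2 := by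
    subst hem
    simp only [zero_add]
    have h1 : PySem.List.pyGetD (xs.map (fun p => PySem.Str.lower p)) (m : Int) ""
        = (xs.map (fun p => PySem.Str.lower p))[m]'(by simpa using hm) :=
      PySem.List.pyGetD_eq_getElem _ "" (by positivity) (by simpa using hm)
    rw [h1]
    simp
  have hmapeq : (PySem.List.pyRange 0 (xs.length : Int) 1).map (fun j =>
      if PySem.List.pyGetD (xs.map (fun p => PySem.Str.lower p)) j ""
           < PySem.List.pyGetD (xs.map (fun p => PySem.Str.lower p)) e.1 ""
         ∨ (PySem.List.pyGetD (xs.map (fun p => PySem.Str.lower p)) j ""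
              = PySem.List.pyGetD (xs.map (fun p => PySem.Str.lower p)) e.1 "" ∧ j < e.1)
      then (1 : Int) else 0)
      = (PySem.List.pyRange 0 (xs.length : Int) 1).map (fun j =>
          if (fun j => pvLex (j, PySem.List.pyGetD xs j "") e) j = true then (1 : Int) else 0) := by
    apply List.map_congr_left
    intro j hj
    have hj' : 0 ≤ j ∧ j < (xs.length : Int) := by
      simpa using (PySem.List.mem_pyRange_one).mp hj
    have hkj : PySem.List.pyGetD (xs.map (fun p => PySem.Str.lower p)) j ""
        = PySem.Str.lower (PySem.List.pyGetD xs j "") := by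
      have h0 : ("" : String) = PySem.Str.lower "" := rfl
      conv_lhs => rw [h0]
      exact PySem.List.pyGetD_map _ xs j ""
    rw [hkj, hkey]
    simp only [pvLex, Bool.or_eq_true, Bool.and_eq_true, decide_eq_true_eq]
  rw [hmapeq, PySem.List.sum_map_ite_one_zero]
  congr 1
  rw [PySem.List.enumerate_eq_map_pyRange xs "", List.countP_map]
  simp only [PySem.List.len_eq]
  rfl

-- the dict built by B's loop: keys in first-occurrence order, value = base + conditional count
theorem bdict_invariant (base : Int) (c : Int × String → Prop) [DecidablePred c]
    (es : List (Int × String)) :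
    (es.foldl (fun d e =>
        let d1 := if d.contains e.2 then d else d.insert e.2 base
        if c e then d1.modify e.2 0 (· + 1) else d1) (PySem.Dict.empty : PySem.Dict String Int)).keys
      = PySem.Set.ofList (es.map (·.2))
    ∧ ∀ k : String,
      (es.foldl (fun d e =>
        let d1 := if d.contains e.2 then d else d.insert e.2 base
        if c e then d1.modify e.2 0 (· + 1) else d1) (PySem.Dict.empty : PySem.Dict String Int)).getD k 0
      = if k ∈ es.map (·.2) then base + (es.countP (fun e => e.2 == k && decide (c e)) : Int) else 0 := by
  induction es using List.reverseRecOn with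
  | nil => simp [PySem.Dict.keys_empty, PySem.Dict.getD_empty, PySem.Set.ofList]
  | append_singleton es e ih =>
    obtain ⟨ihk, ihv⟩ := ih
    simp only [List.foldl_append, List.foldl_cons, List.foldl_nil]
    set d := es.foldl (fun d e =>
        let d1 := if d.contains e.2 then d else d.insert e.2 base
        if c e then d1.modify e.2 0 (· + 1) else d1) (PySem.Dict.empty : PySem.Dict String Int)
      with hdd
    set D1 := if d.contains e.2 then d else d.insert e.2 base with hD1
    have hcont : d.contains e.2 = true ↔ e.2 ∈ es.map (·.2) := by
      rw [PySem.Dict.contains_iff_mem_keys, ihk]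
      exact PySem.Set.mem_ofList _ _
    have hD1c : D1.contains e.2 = true := by
      rw [hD1]
      by_cases hcm : d.contains e.2 = true
      · rw [if_pos hcm]; exact hcm
      · rw [if_neg hcm]; exact PySem.Dict.contains_insert_self _ _ _
    have hmodk : (D1.modify e.2 0 (· + 1)).keys = D1.keys := by
      rw [PySem.Dict.keys_modify]
      exact PySem.Dict.keys_insert_of_contains _ _ hD1c
    have hmapnew : (es ++ [e]).map (·.2) = es.map (·.2) ++ [e.2] := by simp
    have hcnt0 : ¬ e.2 ∈ es.map (·.2) →
        es.countP (fun e' => e'.2 == e.2 && decide (c e')) = 0 := by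
      intro hm
      apply List.countP_eq_zero.mpr
      intro a ha
      simp only [Bool.and_eq_true, beq_iff_eq, not_and]
      intro hae _
      exact absurd (hae ▸ List.mem_map_of_mem ha) hm
    constructor
    · have hk1 : (if c e then D1.modify e.2 0 (· + 1) else D1).keys = D1.keys := by
        by_cases hce : c e
        · rw [if_pos hce, hmodk]
        · rw [if_neg hce]
      rw [hk1, hmapnew, PySem.Set.ofList_append_singleton, ← ihk, PySem.Set.add_eq_ite, hD1]
      by_cases hcm : d.contains e.2 = true
      · rw [if_pos hcm, if_pos ((PySem.Dict.contains_iff_mem_keys _ _).mp hcm)]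
      · have hcm' : d.contains e.2 = false := by
          cases h : d.contains e.2
          · rfl
          · exact absurd h hcm
        rw [if_neg hcm, if_neg (fun hmem => hcm ((PySem.Dict.contains_iff_mem_keys _ _).mpr hmem))]
        exact PySem.Dict.keys_insert_of_not_contains _ _ hcm'
    · intro k
      have hcnt_new : (es ++ [e]).countP (fun e' => e'.2 == k && decide (c e'))
          = es.countP (fun e' => e'.2 == k && decide (c e'))
            + (if e.2 == k && decide (c e) then 1 else 0) := by
        rw [List.countP_append]
        simp [List.countP_cons]
      by_cases hke : k = e.2
      · subst hke
        have hbeq : (e.2 == e.2) = true := by simp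
        by_cases hcm : d.contains e.2 = true
        · have hmm : e.2 ∈ es.map (·.2) := hcont.mp hcm
          have hD1d : D1 = d := by rw [hD1, if_pos hcm]
          have hold : d.getD e.2 0
              = base + (es.countP (fun e' => e'.2 == e.2 && decide (c e')) : Int) := by
            rw [ihv e.2, if_pos hmm]
          by_cases hce : c e
          · rw [if_pos hce, hD1d, PySem.Dict.getD_modify_self, hold,
               if_pos (by rw [hmapnew]; exact List.mem_append_left _ hmm), hcnt_new]
            simp only [hbeq, hce, decide_true, Bool.and_true, if_pos]
            push_cast
            ring
          · rw [if_neg hce, hD1d, hold,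
               if_pos (by rw [hmapnew]; exact List.mem_append_left _ hmm), hcnt_new]
            simp only [hbeq, hce, decide_false, Bool.and_false, Bool.false_eq_true,
              if_neg, not_false_iff]
            push_cast
            ring
        · have hcm' : d.contains e.2 = false := by
            cases h : d.contains e.2
            · rfl
            · exact absurd h hcm
          have hmm : ¬ e.2 ∈ es.map (·.2) := fun hmem => hcm (hcont.mpr hmem)
          have h0 : es.countP (fun e' => e'.2 == e.2 && decide (c e')) = 0 := hcnt0 hmm
          have hD1i : D1 = d.insert e.2 base := by rw [hD1, if_neg hcm]
          have hgD1 : D1.getD e.2 0 = base := by rw [hD1i, PySem.Dict.getD_insert_self]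
          by_cases hce : c e
          · rw [if_pos hce, PySem.Dict.getD_modify_self, hgD1,
               if_pos (by rw [hmapnew]; exact List.mem_append_right _ (by simp)), hcnt_new, h0]
            simp only [hbeq, hce, decide_true, Bool.and_true, if_pos]
            push_cast
            ring
          · rw [if_neg hce, hgD1,
               if_pos (by rw [hmapnew]; exact List.mem_append_right _ (by simp)), hcnt_new, h0]
            simp only [hbeq, hce, decide_false, Bool.and_false, Bool.false_eq_true,
              if_neg, not_false_iff]
            push_cast
            ring
      · have hbeq : (e.2 == k) = false := by
          simp only [beq_eq_false_iff_ne, ne_eq]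
          exact fun h => hke h.symm
        have hLHS : (if c e then D1.modify e.2 0 (· + 1) else D1).getD k 0 = d.getD k 0 := by
          have hgD1 : D1.getD k 0 = d.getD k 0 := by
            rw [hD1]
            by_cases hcm : d.contains e.2 = true
            · rw [if_pos hcm]
            · rw [if_neg hcm, PySem.Dict.getD_insert, if_neg hke]
          by_cases hce : c e
          · rw [if_pos hce, PySem.Dict.getD_modify, if_neg hke, hgD1]
          · rw [if_neg hce, hgD1]
        have hmem : k ∈ (es ++ [e]).map (·.2) ↔ k ∈ es.map (·.2) := by
          rw [hmapnew]
          simp only [List.mem_append, List.mem_singleton]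
          constructor
          · rintro (h | h)
            · exact h
            · exact absurd h hke
          · exact Or.inl
        rw [hLHS, ihv k, hcnt_new]
        simp only [hbeq, Bool.false_and, Bool.false_eq_true, if_neg, not_false_iff, add_zero]
        by_cases hmm : k ∈ es.map (·.2)
        · rw [if_pos hmm, if_pos (hmem.mpr hmm)]
        · rw [if_neg hmm, if_neg (fun h => hmm (hmem.mp h))]

-- the same invariant, for B's actual loop body
theorem bstep_fold (base rem n : Int) (keys : List String) (es : List (Int × String)) :
    (es.foldl (bstep base rem n keys) PySem.Dict.empty).keys = PySem.Set.ofList (es.map (·.2))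
    ∧ ∀ k : String,
      (es.foldl (bstep base rem n keys) PySem.Dict.empty).getD k 0
      = if k ∈ es.map (·.2)
        then base + (es.countP (fun e => e.2 == k && decide (pvRank n keys e < rem)) : Int)
        else 0 :=
  bdict_invariant base (fun e => pvRank n keys e < rem) es

-- a dict-comprehension-style loop over keys: value depends only on the key
theorem getD_foldl_insert_fun {κ ν : Type} [BEq κ] [LawfulBEq κ] [DecidableEq κ]
    (l : List κ) (f : κ → ν) (d : PySem.Dict κ ν) (k : κ) (c0 : ν) :
    (l.foldl (fun d p => d.insert p (f p)) d).getD k c0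
      = if k ∈ l then f k else d.getD k c0 := by
  induction l generalizing d with
  | nil => simp
  | cons p tl ih =>
    simp only [List.foldl_cons, ih, PySem.Dict.getD_insert, List.mem_cons]
    by_cases hk : k ∈ tl <;> by_cases he : k = p <;> simp [hk, he]

theorem keys_update_of_subset {α : Type} [BEq α] [LawfulBEq α]
    (s : PySem.Set α) (xs : List α) (h : ∀ x ∈ xs, x ∈ s) :
    PySem.Set.update s xs = s := by
  rw [PySem.Set.update_eq_append_filter]
  have hfil : List.filter (fun y => !s.contains y) (PySem.Set.ofList xs) = [] := by
    rw [List.filter_eq_nil_iff]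
    intro a ha
    simpa using h a ((PySem.Set.mem_ofList xs a).mp ha)
  rw [hfil, List.append_nil]

-- ===== VERDICT (by name: the statement is the Claim_ definition above) =====
theorem split_amount_cents_fair_spec : Claim_equal_split_amount_cents_fair := by
  intro amount_cents participants _hdom hpre
  unfold Spec_split_amount_cents_fair split_amount_cents_fair split_amount_cents_fair_alt
  simp only []
  set n : Int := (participants.length : Int) with hn
  have hnpos : 0 < n := by
    have : participants.length ≠ 0 := by simpa using hpre
    omega
  set base := PySem.Int.floordiv amount_cents n with hbase
  set rem := PySem.Int.mod amount_cents n with hrem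
  have hr0 : 0 ≤ rem := PySem.Int.mod_nonneg amount_cents hnpos
  have hrn : rem < n := PySem.Int.mod_lt amount_cents hnpos
  set sp := PySem.List.sorted participants (fun x => PySem.Str.lower x) false with hsp
  have hsplen : (sp.length : Int) = n := by
    rw [hsp, PySem.List.length_sorted]
  set ts := sp.take rem.toNat with hts
  have htslen : ts.length = rem.toNat := by
    rw [hts, List.length_take]
    omega
  -- A's index loop over range(rem) is a fold over ts
  have hloopA : ∀ d0 : PySem.Dict String Int,
      (PySem.List.pyRange 0 rem 1).foldl
        (fun d i => d.modify (PySem.List.pyGetD sp i "") 0 (· + 1)) d0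
      = ts.foldl (fun d x => d.modify x 0 (· + 1)) d0 := by
    intro d0
    have hrng : PySem.List.pyRange 0 rem 1 = PySem.List.pyRange 0 (PySem.List.len ts) 1 := by
      rw [PySem.List.len_eq, htslen]
      congr 1
      omega
    rw [hrng, ← PySem.List.foldl_pyRange_zero_pyGetD ts "" (fun d x => d.modify x 0 (· + 1)) d0]
    apply PySem.List.foldl_congr_mem
    intro acc i hi
    have hi' : 0 ≤ i ∧ i < (ts.length : Int) := by
      simp only [PySem.List.mem_pyRange_one, PySem.List.len_eq] at hi
      exact hi
    have h1 : PySem.List.pyGetD sp i "" = sp[i.toNat]'(by omega) :=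
      PySem.List.pyGetD_eq_getElem sp "" hi'.1 (by omega)
    have h2 : PySem.List.pyGetD ts i "" = ts[i.toNat]'(by omega) :=
      PySem.List.pyGetD_eq_getElem ts "" hi'.1 (by omega)
    have h3 : ts[i.toNat]'(by omega) = sp[i.toNat]'(by omega) := List.getElem_take
    rw [h1, h2, h3]
  rw [hloopA]
  -- A's dict: keys and values
  have htsmem : ∀ x ∈ ts, x ∈ participants := by
    intro x hx
    have : x ∈ sp := List.mem_of_mem_take hx
    exact (PySem.List.mem_sorted participants _ false x).mp this
  have hkA : (ts.foldl (fun d x => d.modify x 0 (· + 1))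
        (participants.foldl (fun d p => d.insert p base) PySem.Dict.empty)).keys
      = PySem.Set.ofList participants := by
    have hbaseK : (participants.foldl (fun d p => d.insert p base) PySem.Dict.empty).keys
        = PySem.Set.ofList participants := by
      rw [PySem.Dict.keys_foldl_insert participants (fun _ _ => base)]
      simp only [PySem.Dict.keys_empty]
      exact PySem.Set.update_nil_left participants
    rw [PySem.Dict.keys_foldl_modify ts 0 (fun _ _ v => v + 1), hbaseK]
    exact keys_update_of_subset _ ts (by
      intro x hx
      exact (PySem.Set.mem_ofList participants x).mpr (htsmem x hx))
  -- B's dict: keys and values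
  have hB := bstep_fold base rem n (participants.map (fun p => PySem.Str.lower p))
    (PySem.List.enumerate participants)
  have hkB : ((PySem.List.enumerate participants).foldl
        (bstep base rem n (participants.map (fun p => PySem.Str.lower p)))
        PySem.Dict.empty).keys = PySem.Set.ofList participants := by
    rw [hB.1, PySem.List.map_snd_enumerate]
  -- compare the items lists
  rw [PySem.Dict.items_eq_map_keys _ (by rw [hkA]; exact PySem.Set.nodup_ofList participants) (0 : Int),
      PySem.Dict.items_eq_map_keys _ (by rw [hkB]; exact PySem.Set.nodup_ofList participants) (0 : Int),
      hkA, hkB]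
  apply List.map_congr_left
  intro k hk
  have hkp : k ∈ participants := (PySem.Set.mem_ofList participants k).mp hk
  have hA : (ts.foldl (fun d x => d.modify x 0 (· + 1))
        (participants.foldl (fun d p => d.insert p base) PySem.Dict.empty)).getD k 0
      = base + (ts.count k : Int) := by
    rw [PySem.Dict.getD_foldl_modify_add_one,
        getD_foldl_insert_fun participants (fun _ => base) PySem.Dict.empty k 0]
    simp [hkp]
  have hBv : ((PySem.List.enumerate participants).foldl
        (bstep base rem n (participants.map (fun p => PySem.Str.lower p)))
        PySem.Dict.empty).getD k 0
      = base + ((PySem.List.enumerate participants).countP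
          (fun e => e.2 == k && decide (pvRank n (participants.map (fun p => PySem.Str.lower p)) e < rem)) : Int) := by
    rw [hB.2 k, if_pos (by rw [PySem.List.map_snd_enumerate]; exact hkp)]
  rw [hA, hBv]
  -- the crux: count of k in the first rem sorted slots = rank-filtered count
  have hcount : ts.count k
      = (PySem.List.enumerate participants).countP
          (fun e => e.2 == k && decide (pvRank n (participants.map (fun p => PySem.Str.lower p)) e < rem)) := by
    rw [hts, hsp]
    rw [take_sorted_count participants rem.toNat k]
    apply List.countP_congr
    intro e he
    have hre := rank_sum_eq participants e he
    have hiff : (PySem.List.enumerate participants).countP (fun f => pvLex f e) < rem.toNat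
        ↔ pvRank n (participants.map (fun p => PySem.Str.lower p)) e < rem := by
      rw [hn, hre]
      omega
    rw [decide_eq_decide.mpr hiff]
  rw [hcount]
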